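-- pv_equiv track=rewrite | github.com/Tawana2000/DSA-WITH-PYTHON | SEARCH ALGORITHMS/BINARY SEARCH/binary-search-ex1.py | delivery_times
-- ===== SOURCE A (Python) =====
-- def delivery_times(slots, target):
--
--     left = 0
--     right = len(slots) - 1
--     answer = -1
--
--     while left <= right:
--         mid = (left + right) // 2
--
--         if target < slots[mid]:
--             answer = mid
--             right = mid - 1
--
--         else:
--             left = mid + 1
--
--     return answer
-- ===== SOURCE B (Python) =====
-- def delivery_times(slots, target):
--     def go(lo, n):
--         # window is slots[lo : lo+n]; returns the leftmost qualifying index or None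
--         if n == 0:
--             return None
--         k = (n - 1) // 2
--         if target < slots[lo + k]:
--             r = go(lo, k)
--             return r if r is not None else lo + k
--         return go(lo + k + 1, n - k - 1)
--     r = go(0, len(slots))
--     return r if r is not None else -1
-- ===== Notes on version B (the rewrite author's own statement) =====
-- stated objective: alternative
-- what changed: Replaced the iterative while-loop on Int bounds with an answer accumulator by a recursive helper over a (lo, window-size) pair of natural numbers that returns None/-1 at the base case and prefers a non-None left-half result over the current midpoint.
import Mathlib
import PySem

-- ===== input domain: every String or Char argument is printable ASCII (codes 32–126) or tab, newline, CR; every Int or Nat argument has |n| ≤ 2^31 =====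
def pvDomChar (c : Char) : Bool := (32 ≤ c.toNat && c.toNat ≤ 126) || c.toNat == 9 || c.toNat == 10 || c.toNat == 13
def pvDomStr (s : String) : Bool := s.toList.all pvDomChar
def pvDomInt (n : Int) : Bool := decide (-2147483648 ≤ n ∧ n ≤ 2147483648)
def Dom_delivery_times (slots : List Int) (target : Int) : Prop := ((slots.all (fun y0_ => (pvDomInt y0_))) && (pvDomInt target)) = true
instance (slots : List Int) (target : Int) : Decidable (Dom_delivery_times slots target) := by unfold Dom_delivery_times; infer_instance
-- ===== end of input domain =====

-- B replaces A's iterative Int-bound loop with an answer accumulator by a recursive helper over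
-- a (lo, window-size) pair of naturals returning Option Nat (alternative decomposition, same cost).

-- ===== PORT A =====
-- A's while loop, state (left, right, answer); the 'none' branch is unreachable (mid in range when left ≤ right)
def pvLoopA (slots : List Int) (target : Int) (left right answer : Int) : Int :=
  if h : left ≤ right then
    let mid := PySem.Int.floordiv (left + right) 2
    match PySem.List.pyGet? slots mid with
    | some v =>
      if target < v then pvLoopA slots target left (mid - 1) mid
      else pvLoopA slots target (mid + 1) right answer
    | none => answer
  else answer
termination_by (right + 1 - left).toNat
decreasing_by
  · have := PySem.Int.floordiv_two_mid_bounds h; omega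
  · have := PySem.Int.floordiv_two_mid_bounds h; omega

def delivery_times (slots : List Int) (target : Int) : Int :=
  pvLoopA slots target 0 ((slots.length : Int) - 1) (-1)

-- ===== PORT B =====
-- Source B's go(lo, n): window slots[lo : lo+n]; recursion on the window size n.
-- slots[lo + k] is ported with getD 0: on every reachable call lo + n ≤ slots.length and n ≥ 1,
-- so the index is in range and the default is never used (Source B never indexes out of range); exact there.
def pvGoB (slots : List Int) (target : Int) (lo n : Nat) : Option Nat :=
  if n = 0 then none
  else
    let k := (n - 1) / 2
    if target < slots.getD (lo + k) 0 then
      match pvGoB slots target lo k with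
      | some r => some r
      | none => some (lo + k)
    else pvGoB slots target (lo + k + 1) (n - k - 1)
termination_by n
decreasing_by all_goals omega

def delivery_times_alt (slots : List Int) (target : Int) : Int :=
  match pvGoB slots target 0 slots.length with
  | some r => (r : Int)
  | none => -1

-- ===== PRECONDITION & SPEC =====
def Spec_delivery_times (slots : List Int) (target : Int) (out : Int) : Prop := out = delivery_times_alt slots target
instance (slots : List Int) (target : Int) (out : Int) : Decidable (Spec_delivery_times slots target out) := by unfold Spec_delivery_times; infer_instance

-- ===== CLAIM (what is proved, stated in full; the proofs are below) =====
def Claim_equal_delivery_times : Prop := ∀ (slots : List Int) (target : Int), Dom_delivery_times slots target → Spec_delivery_times slots target (delivery_times slots target)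

-- ===== LEMMAS AND PROOFS =====

-- A's loop started on the window [lo, lo+n-1] (within bounds) returns B's helper result,
-- falling back to 'answer' when the helper yields none.
theorem pvLoopA_eq_goB (slots : List Int) (target : Int) :
    ∀ n lo : Nat, ∀ answer : Int, lo + n ≤ slots.length →
      pvLoopA slots target (lo : Int) ((lo : Int) + (n : Int) - 1) answer =
        match pvGoB slots target lo n with
        | some r => (r : Int)
        | none => answer := by
  intro n
  induction n using Nat.strong_induction_on with
  | _ n ih =>
    intro lo answer hlen
    by_cases hn : n = 0
    · subst hn
      rw [pvLoopA, dif_neg (by omega), pvGoB, if_pos rfl]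
    · have hn1 : 1 ≤ n := by omega
      set k := (n - 1) / 2 with hk
      have hkn : k < n := by omega
      have hmid : PySem.Int.floordiv ((lo : Int) + ((lo : Int) + (n : Int) - 1)) 2
          = ((lo + k : Nat) : Int) := by
        rw [PySem.Int.floordiv_eq_ediv_of_pos (by omega)]
        push_cast; omega
      have hle : (lo : Int) ≤ (lo : Int) + (n : Int) - 1 := by omega
      have hidx : lo + k < slots.length := by omega
      have hget : PySem.List.pyGet? slots (((lo + k : Nat) : Int)) = some (slots.getD (lo + k) 0) := by
        rw [PySem.List.pyGet?_natCast]
        simp [List.getD, List.getElem?_eq_getElem hidx]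
      rw [pvLoopA, dif_pos hle, pvGoB, if_neg hn]
      simp only [hmid, hget]
      simp only [← hk]
      by_cases hlt : target < slots.getD (lo + k) 0
      · rw [if_pos hlt, if_pos hlt]
        have : ((lo + k : Nat) : Int) - 1 = (lo : Int) + (k : Int) - 1 := by push_cast; omega
        rw [this, ih k hkn lo ((lo + k : Nat) : Int) (by omega)]
        cases pvGoB slots target lo k <;> simp
      · rw [if_neg hlt, if_neg hlt]
        have h1 : ((lo + k : Nat) : Int) + 1 = ((lo + k + 1 : Nat) : Int) := by push_cast; ring
        have h2 : (lo : Int) + (n : Int) - 1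
            = ((lo + k + 1 : Nat) : Int) + ((n - k - 1 : Nat) : Int) - 1 := by push_cast; omega
        rw [h1, h2, ih (n - k - 1) (by omega) (lo + k + 1) answer (by omega)]

-- ===== VERDICT (by name: the statement is the Claim_ definition above) =====
theorem delivery_times_spec : Claim_equal_delivery_times := by
  intro slots target _
  unfold Spec_delivery_times delivery_times delivery_times_alt
  have h := pvLoopA_eq_goB slots target slots.length 0 (-1) (by omega)
  simpa using h
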